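-- pv_equiv track=rewrite | github.com/pietrocfn02/neXSim-latest | neXSim/characterization.py | clean_strict_subsets
-- ===== SOURCE A (Python) =====
-- import copy
--
-- def clean_strict_subsets(to_clean: list[set[str]]) -> list[set[str]]:
--     to_return = copy.deepcopy(to_clean)
--     for subset in to_clean:
--         for other_subset in to_clean:
--             if len(other_subset) < len(subset) and other_subset.issubset(subset):
--                 if other_subset in to_return:
--                     to_return.remove(other_subset)
--     return to_return
-- ===== SOURCE B (Python) =====
-- import copy
--
-- def clean_strict_subsets(to_clean: list[set[str]]) -> list[set[str]]:
--     return [copy.deepcopy(s) for s in to_clean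
--             if not any(len(s) < len(t) and s.issubset(t) for t in to_clean)]
-- ===== Notes on version B (the rewrite author's own statement) =====
-- stated objective: simpler
-- what changed: Replaces A's deepcopy-then-mutate scheme (nested loops doing membership tests and first-occurrence remove on the result list, O(n) each) with a single pure comprehension that keeps a set iff no other set strictly contains it; the result-list scans and removal bookkeeping disappear.
import Mathlib
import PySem

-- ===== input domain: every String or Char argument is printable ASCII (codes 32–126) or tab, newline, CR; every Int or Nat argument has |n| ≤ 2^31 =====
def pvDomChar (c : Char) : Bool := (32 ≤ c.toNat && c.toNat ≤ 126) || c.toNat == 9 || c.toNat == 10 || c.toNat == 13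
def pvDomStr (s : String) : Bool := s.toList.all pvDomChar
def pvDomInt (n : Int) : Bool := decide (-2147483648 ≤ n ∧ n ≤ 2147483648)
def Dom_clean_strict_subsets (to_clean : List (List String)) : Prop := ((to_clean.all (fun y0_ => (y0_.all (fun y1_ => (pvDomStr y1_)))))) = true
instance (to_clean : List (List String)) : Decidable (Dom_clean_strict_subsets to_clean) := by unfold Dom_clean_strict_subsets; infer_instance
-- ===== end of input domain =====

-- B replaces A's deepcopy-then-mutate scheme (nested loops with membership tests and
-- first-occurrence remove on the result list) by a single pure filter keeping a set iff
-- no other set strictly contains it (objective: simpler).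

-- ===== PORT A =====
-- Python set helpers on the distinct-element list encoding:
-- `x.issubset(t)`
def pvSub (x t : List String) : Bool := x.all (fun a => t.contains a)
-- set equality (used by Python's `in` and `.remove` on a list of sets)
def pvSeq (x y : List String) : Bool := pvSub x y && pvSub y x
-- `to_return.remove(other)`: drop the first element set-equal to `y`
def pvRm : List (List String) → List String → List (List String)
  | [], _ => []
  | h :: tl, y => if pvSeq y h then tl else h :: pvRm tl y

-- body of A's inner loop (one `other_subset` step of the mutation)
def pvInnerStep (subset : List String) (ret : List (List String)) (other : List String) :
    List (List String) :=
  if decide (other.length < subset.length) && pvSub other subset then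
    (if ret.any (fun e => pvSeq other e) then pvRm ret other else ret)
  else ret

def clean_strict_subsets (to_clean : List (List String)) : List (List String) :=
  -- to_return = deepcopy(to_clean); then the two nested for-loops mutating to_return
  to_clean.foldl (fun to_return subset => to_clean.foldl (pvInnerStep subset) to_return) to_clean

-- ===== PORT B =====
def clean_strict_subsets_alt (to_clean : List (List String)) : List (List String) :=
  to_clean.filter (fun s => !(to_clean.any (fun t => decide (s.length < t.length) && pvSub s t)))

-- ===== PRECONDITION & SPEC =====
-- Pre_ states the representation invariant of the Python argument type list[set[str]]:
-- each inner list encodes a set, i.e. holds distinct elements (A itself never raises).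
def Pre_clean_strict_subsets (to_clean : List (List String)) : Prop :=
  ∀ s ∈ to_clean, s.Nodup
instance (to_clean : List (List String)) : Decidable (Pre_clean_strict_subsets to_clean) := by
  unfold Pre_clean_strict_subsets; infer_instance
def pvWitness_clean_strict_subsets : List (List String) := [["a", "b"], ["a"], ["c"]]

def Spec_clean_strict_subsets (to_clean : List (List String)) (out : List (List String)) : Prop := out = clean_strict_subsets_alt to_clean
instance (to_clean : List (List String)) (out : List (List String)) : Decidable (Spec_clean_strict_subsets to_clean out) := by unfold Spec_clean_strict_subsets; infer_instance

-- ===== CLAIM (what is proved, stated in full; the proofs are below) =====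
def Claim_equal_clean_strict_subsets : Prop := ∀ (to_clean : List (List String)), Dom_clean_strict_subsets to_clean → Pre_clean_strict_subsets to_clean → Spec_clean_strict_subsets to_clean (clean_strict_subsets to_clean)

-- ===== LEMMAS AND PROOFS =====

-- abbreviation for A's strict-containment test, as it appears in both ports
def pvCond (t x : List String) : Bool := decide (x.length < t.length) && pvSub x t

theorem pvSub_iff (x t : List String) : pvSub x t = true ↔ ∀ a ∈ x, a ∈ t := by
  simp [pvSub]

theorem pvSub_refl (x : List String) : pvSub x x = true := by
  simp [pvSub_iff]

theorem pvSub_trans {a b c : List String} (h1 : pvSub a b = true) (h2 : pvSub b c = true) :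
    pvSub a c = true := by
  rw [pvSub_iff] at *
  exact fun z hz => h2 z (h1 z hz)

theorem pvSeq_refl (x : List String) : pvSeq x x = true := by
  simp [pvSeq, pvSub_refl]

theorem pvSeq_symm {x y : List String} (h : pvSeq x y = true) : pvSeq y x = true := by
  simp [pvSeq] at *; exact ⟨h.2, h.1⟩

theorem pvSeq_trans {x y z : List String} (h1 : pvSeq x y = true) (h2 : pvSeq y z = true) :
    pvSeq x z = true := by
  simp only [pvSeq, Bool.and_eq_true] at *
  exact ⟨pvSub_trans h1.1 h2.1, pvSub_trans h2.2 h1.2⟩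

-- set-equal Nodup lists have the same length
theorem pvSeq_length {x y : List String} (h : pvSeq x y = true)
    (hx : x.Nodup) (hy : y.Nodup) : x.length = y.length := by
  simp only [pvSeq, Bool.and_eq_true, pvSub_iff] at h
  have hfin : x.toFinset = y.toFinset := by
    apply Finset.ext
    intro a
    simp only [List.mem_toFinset]
    exact ⟨fun ha => h.1 a ha, fun ha => h.2 a ha⟩
  calc x.length = x.toFinset.card := (List.toFinset_card_of_nodup hx).symm
    _ = y.toFinset.card := by rw [hfin]
    _ = y.length := List.toFinset_card_of_nodup hy

theorem pvCond_congr {t x y : List String} (h : pvSeq x y = true)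
    (hx : x.Nodup) (hy : y.Nodup) : pvCond t x = pvCond t y := by
  have hlen : x.length = y.length := pvSeq_length h hx hy
  simp only [pvSeq, Bool.and_eq_true, pvSub_iff] at h
  have hsub : pvSub x t = pvSub y t := by
    apply Bool.eq_iff_iff.mpr
    rw [pvSub_iff, pvSub_iff]
    constructor
    · intro hs a ha; exact hs a (h.2 a ha)
    · intro hs a ha; exact hs a (h.1 a ha)
  simp [pvCond, hlen, hsub]

theorem pvRm_sublist (ret : List (List String)) (y : List String) :
    (pvRm ret y).Sublist ret := by
  induction ret with
  | nil => simp [pvRm]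
  | cons h tl ih =>
    simp only [pvRm]
    split
    · exact (List.sublist_cons_self h tl)
    · exact ih.cons₂ h

theorem pvRm_countP_of_seq {x y : List String} (ret : List (List String))
    (hxy : pvSeq x y = true) (hany : ret.any (fun e => pvSeq y e) = true) :
    (pvRm ret y).countP (fun z => pvSeq z x) + 1 = ret.countP (fun z => pvSeq z x) := by
  induction ret with
  | nil => simp at hany
  | cons h tl ih =>
    by_cases hh : pvSeq y h = true
    · have hhx : pvSeq h x = true := pvSeq_trans (pvSeq_symm hh) (pvSeq_symm hxy)
      simp [pvRm, hh, hhx]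
    · have hany' : tl.any (fun e => pvSeq y e) = true := by
        simp only [List.any_cons, Bool.or_eq_true] at hany
        cases hany with
        | inl h1 => exact absurd h1 hh
        | inr h2 => exact h2
      rw [Bool.not_eq_true] at hh
      have hrm : pvRm (h :: tl) y = h :: pvRm tl y := by simp [pvRm, hh]
      rw [hrm, List.countP_cons, List.countP_cons, ← ih hany']
      ring

theorem pvRm_countP_of_not_seq {x y : List String} (ret : List (List String))
    (hxy : pvSeq x y = false) :
    (pvRm ret y).countP (fun z => pvSeq z x) = ret.countP (fun z => pvSeq z x) := by
  induction ret with
  | nil => simp [pvRm]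
  | cons h tl ih =>
    by_cases hh : pvSeq y h = true
    · have hhx : pvSeq h x = false := by
        rw [Bool.eq_false_iff]
        intro hc
        have : pvSeq x y = true := pvSeq_trans (pvSeq_symm hc) (pvSeq_symm hh)
        rw [hxy] at this; simp at this
      simp [pvRm, hh, hhx]
    · simp [pvRm, hh, List.countP_cons, ih]

theorem pvRm_filter {p : List String → Bool} (ret : List (List String)) (y : List String)
    (hp : ∀ z ∈ ret, pvSeq z y = true → p z = false) :
    (pvRm ret y).filter p = ret.filter p := by
  induction ret with
  | nil => simp [pvRm]
  | cons h tl ih =>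
    by_cases hh : pvSeq y h = true
    · have hph : p h = false := hp h (List.mem_cons_self) (pvSeq_symm hh)
      simp [pvRm, hh, hph]
    · have ih' := ih (fun z hz => hp z (List.mem_cons_of_mem h hz))
      simp [pvRm, hh, List.filter_cons, ih']

theorem inner_fold (t : List String) (L : List (List String)) :
    ∀ (ret : List (List String)),
    (∀ x ∈ ret, x.Nodup) → (∀ y ∈ L, y.Nodup) →
    (∀ x ∈ ret, pvCond t x = true →
      ret.countP (fun z => pvSeq z x) ≤ L.countP (fun z => pvSeq z x)) →
    L.foldl (pvInnerStep t) ret = ret.filter (fun x => !pvCond t x) := by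
  induction L with
  | nil =>
    intro ret hN _ hC
    simp only [List.foldl_nil]
    symm
    rw [List.filter_eq_self]
    intro x hx
    simp only [Bool.not_eq_eq_eq_not, Bool.not_true]
    rw [Bool.eq_false_iff]
    intro hc
    have h1 := hC x hx hc
    have h2 : 0 < ret.countP (fun z => pvSeq z x) :=
      List.countP_pos_iff.mpr ⟨x, hx, pvSeq_refl x⟩
    simp only [List.countP_nil, Nat.le_zero] at h1
    omega
  | cons y L' ih =>
    intro ret hN hNL hC
    have hyN : y.Nodup := hNL y List.mem_cons_self
    have hNL' : ∀ z ∈ L', z.Nodup := fun z hz => hNL z (List.mem_cons_of_mem y hz)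
    simp only [List.foldl_cons]
    by_cases hcy : pvCond t y = true
    · by_cases hany : ret.any (fun e => pvSeq y e) = true
      · -- a set-equal element is removed
        have hstep : pvInnerStep t ret y = pvRm ret y := by
          simp only [pvInnerStep]
          rw [show (decide (y.length < t.length) && pvSub y t) = pvCond t y from rfl, hcy]
          simp [hany]
        rw [hstep]
        have hsub := pvRm_sublist ret y
        have hN' : ∀ x ∈ pvRm ret y, x.Nodup := fun x hx => hN x (hsub.subset hx)
        have hC' : ∀ x ∈ pvRm ret y, pvCond t x = true →
            (pvRm ret y).countP (fun z => pvSeq z x) ≤ L'.countP (fun z => pvSeq z x) := by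
          intro x hx hcx
          have hxret : x ∈ ret := hsub.subset hx
          have hCx := hC x hxret hcx
          by_cases hxy : pvSeq x y = true
          · have h1 := pvRm_countP_of_seq ret hxy hany
            have h2 : ret.countP (fun z => pvSeq z x)
                ≤ L'.countP (fun z => pvSeq z x) + 1 := by
              rw [List.countP_cons] at hCx
              have hsx : pvSeq y x = true := pvSeq_symm hxy
              simp [hsx] at hCx
              omega
            omega
          · rw [Bool.not_eq_true] at hxy
            rw [pvRm_countP_of_not_seq ret hxy]
            have hyx : pvSeq y x = false := by
              rw [Bool.eq_false_iff]
              intro hc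
              have := pvSeq_symm hc
              rw [hxy] at this; simp at this
            rw [List.countP_cons] at hCx
            simp [hyx] at hCx
            exact hCx
        rw [ih (pvRm ret y) hN' hNL' hC']
        apply pvRm_filter
        intro z hz hzy
        have hz' : z.Nodup := hN z hz
        have : pvCond t z = pvCond t y := pvCond_congr hzy hz' hyN
        simp [this, hcy]
      · -- nothing set-equal present: step is identity
        have hstep : pvInnerStep t ret y = ret := by
          simp only [pvInnerStep]
          rw [show (decide (y.length < t.length) && pvSub y t) = pvCond t y from rfl, hcy]
          simp [hany]
        rw [hstep]
        apply ih ret hN hNL'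
        intro x hx hcx
        have hCx := hC x hx hcx
        have hyx : pvSeq y x = false := by
          rw [Bool.eq_false_iff]
          intro hc
          apply hany
          exact List.any_eq_true.mpr ⟨x, by simpa using hx, hc⟩
        rw [List.countP_cons] at hCx
        simp [hyx] at hCx
        exact hCx
    · -- condition false: step is identity, and y's class never satisfies pvCond
      rw [Bool.not_eq_true] at hcy
      have hstep : pvInnerStep t ret y = ret := by
        simp only [pvInnerStep]
        rw [show (decide (y.length < t.length) && pvSub y t) = pvCond t y from rfl, hcy]
        simp
      rw [hstep]
      apply ih ret hN hNL'
      intro x hx hcx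
      have hCx := hC x hx hcx
      have hyx : pvSeq y x = false := by
        rw [Bool.eq_false_iff]
        intro hc
        have hx' : x.Nodup := hN x hx
        have : pvCond t x = pvCond t y := pvCond_congr (pvSeq_symm hc) hx' hyN
        rw [hcx, hcy] at this
        simp at this
      rw [List.countP_cons] at hCx
      simp [hyx] at hCx
      exact hCx

theorem outer_fold (to_clean : List (List String)) (hN : ∀ x ∈ to_clean, x.Nodup) :
    ∀ (outs : List (List String)) (q : List String → Bool),
    (∀ t ∈ outs, t.Nodup) →
    outs.foldl (fun ret t => to_clean.foldl (pvInnerStep t) ret) (to_clean.filter q)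
      = to_clean.filter (fun x => q x && !(outs.any (fun t => pvCond t x))) := by
  intro outs
  induction outs with
  | nil =>
    intro q _
    simp only [List.foldl_nil, List.any_nil, Bool.not_false, Bool.and_true]
  | cons t outs' ih =>
    intro q hNO
    have hNO' : ∀ z ∈ outs', z.Nodup := fun z hz => hNO z (List.mem_cons_of_mem t hz)
    simp only [List.foldl_cons]
    have hstep : to_clean.foldl (pvInnerStep t) (to_clean.filter q)
        = (to_clean.filter q).filter (fun x => !pvCond t x) := by
      apply inner_fold
      · exact fun x hx => hN x (List.mem_of_mem_filter hx)
      · exact hN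
      · intro x _ _
        exact (List.filter_sublist ..).countP_le
    rw [hstep, List.filter_filter]
    rw [ih (fun x => !pvCond t x && q x) hNO']
    apply List.filter_congr
    intro x _
    simp only [List.any_cons, Bool.not_or, Bool.and_assoc]
    cases q x <;> cases pvCond t x <;> cases outs'.any (fun t => pvCond t x) <;> rfl

-- ===== VERDICT (by name: the statement is the Claim_ definition above) =====
theorem clean_strict_subsets_spec : Claim_equal_clean_strict_subsets := by
  intro to_clean _ hPre
  show clean_strict_subsets to_clean = clean_strict_subsets_alt to_clean
  unfold clean_strict_subsets clean_strict_subsets_alt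
  have h0 : to_clean.filter (fun _ => true) = to_clean := by simp
  have hmain := outer_fold to_clean hPre to_clean (fun _ => true) hPre
  rw [h0] at hmain
  rw [hmain]
  apply List.filter_congr
  intro x _
  simp only [Bool.true_and]
  rfl
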